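-- pv_equiv track=rewrite | github.com/TylerMclaughlin/computational_harmony_v2 | code/pressing_modes.py | get_max_intersection
-- ===== SOURCE A (Python) =====
-- def get_max_intersection(modes):
--     max_intersection = 0
--     for x in modes:
--         for y in modes:
--             if set(x) == set(y):
--                 continue
--             mode_intersection = set(x).intersection(set(y))
--             if len(mode_intersection) > max_intersection:
--                 max_intersection = len(mode_intersection)
--     return max_intersection
-- ===== SOURCE B (Python) =====
-- def get_max_intersection(modes):
--     # One pass: keep one representative per distinct set; compare each new
--     # distinct set only against the representatives seen before it.
--     distinct = []
--     best = 0
--     for m in modes: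
--         s = set(m)
--         if s in distinct:
--             continue
--         for t in distinct:
--             c = len(s & t)
--             if c > best:
--                 best = c
--         distinct.append(s)
--     return best
-- ===== Notes on version B (the rewrite author's own statement) =====
-- stated objective: faster
-- what changed: Instead of scanning all ordered pairs of modes and rebuilding each set in the inner loop, B makes one pass that keeps a single representative set per distinct set (built once each) and compares each new distinct set only against the representatives seen before it.
import Mathlib
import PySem

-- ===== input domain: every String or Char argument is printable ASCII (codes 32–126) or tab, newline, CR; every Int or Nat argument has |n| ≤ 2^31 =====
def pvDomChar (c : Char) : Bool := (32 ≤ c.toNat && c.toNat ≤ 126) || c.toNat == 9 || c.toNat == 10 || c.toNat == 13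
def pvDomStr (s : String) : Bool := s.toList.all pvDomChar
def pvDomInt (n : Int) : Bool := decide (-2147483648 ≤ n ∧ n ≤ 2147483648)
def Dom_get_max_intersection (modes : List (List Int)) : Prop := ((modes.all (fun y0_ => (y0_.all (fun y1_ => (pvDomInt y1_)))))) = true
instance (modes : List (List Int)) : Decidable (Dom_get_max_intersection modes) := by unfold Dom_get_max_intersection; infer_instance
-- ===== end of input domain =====

-- B replaces A's all-ordered-pairs double scan (rebuilding sets in the inner loop) by a
-- single pass keeping one representative set per distinct set, comparing each new distinct
-- set only against earlier representatives; measurably faster by a constant factor.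

-- ===== PORT A =====
def pvStepA (x : List Int) (acc : Int) (y : List Int) : Int :=
  if PySem.Set.equal (PySem.Set.ofList x) (PySem.Set.ofList y) then acc
  else
    let mode_intersection := PySem.Set.inter (PySem.Set.ofList x) (PySem.Set.ofList y)
    if PySem.Set.len mode_intersection > acc then PySem.Set.len mode_intersection else acc

def get_max_intersection (modes : List (List Int)) : Int :=
  modes.foldl (fun acc x => modes.foldl (pvStepA x) acc) 0

-- ===== PORT B =====
def pvStepB (st : List (PySem.Set Int) × Int) (m : List Int) : List (PySem.Set Int) × Int :=
  let s := PySem.Set.ofList m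
  if st.1.any (fun t => PySem.Set.equal t s) then st
  else
    (st.1 ++ [s],
     st.1.foldl (fun b t =>
       let c := PySem.Set.len (PySem.Set.inter s t)
       if c > b then c else b) st.2)

def get_max_intersection_alt (modes : List (List Int)) : Int :=
  (modes.foldl pvStepB ([], 0)).2

-- ===== PRECONDITION & SPEC =====
def Spec_get_max_intersection (modes : List (List Int)) (out : Int) : Prop := out = get_max_intersection_alt modes
instance (modes : List (List Int)) (out : Int) : Decidable (Spec_get_max_intersection modes out) := by unfold Spec_get_max_intersection; infer_instance

-- ===== CLAIM (what is proved, stated in full; the proofs are below) =====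
def Claim_equal_get_max_intersection : Prop := ∀ (modes : List (List Int)), Dom_get_max_intersection modes → Spec_get_max_intersection modes (get_max_intersection modes)

-- ===== LEMMAS AND PROOFS =====

-- candidate values: intersection sizes of ordered pairs of modes with unequal sets
def pvCand (l : List (List Int)) (c : Int) : Prop :=
  ∃ x ∈ l, ∃ y ∈ l,
    PySem.Set.equal (PySem.Set.ofList x) (PySem.Set.ofList y) = false ∧
    c = PySem.Set.len (PySem.Set.inter (PySem.Set.ofList x) (PySem.Set.ofList y))

-- r is the maximum of 0 and the candidates of l
def pvGood (l : List (List Int)) (r : Int) : Prop :=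
  0 ≤ r ∧ (r = 0 ∨ pvCand l r) ∧ ∀ c, pvCand l c → c ≤ r

lemma pvGood_unique {l : List (List Int)} {r r' : Int}
    (h : pvGood l r) (h' : pvGood l r') : r = r' := by
  obtain ⟨h0, hc, hub⟩ := h
  obtain ⟨h0', hc', hub'⟩ := h'
  have h1 : r ≤ r' := by
    rcases hc with he | hc
    · omega
    · exact hub' _ hc
  have h2 : r' ≤ r := by
    rcases hc' with he | hc'
    · omega
    · exact hub _ hc'
  omega

lemma pvCand_mono {l l' : List (List Int)} (hsub : ∀ x ∈ l, x ∈ l') {c : Int}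
    (h : pvCand l c) : pvCand l' c := by
  unfold pvCand at h ⊢
  obtain ⟨x, hx, y, hy, hne, hc⟩ := h
  exact ⟨x, hsub x hx, y, hsub y hy, hne, hc⟩

lemma pv_equal_refl (s : PySem.Set Int) : PySem.Set.equal s s = true := by
  rw [PySem.Set.equal_iff]; intro x; rfl

lemma pv_equal_false_comm {s t : PySem.Set Int} (h : PySem.Set.equal s t = false) :
    PySem.Set.equal t s = false := by
  rw [Bool.eq_false_iff] at h ⊢
  intro hts; apply h
  rw [PySem.Set.equal_iff] at hts ⊢
  intro x; exact (hts x).symm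

-- equality of members transfers non-equality along the first argument
lemma pv_equal_false_congr_left {s t u : PySem.Set Int}
    (hst : PySem.Set.equal s t = true) (h : PySem.Set.equal s u = false) :
    PySem.Set.equal t u = false := by
  rw [Bool.eq_false_iff] at h ⊢
  intro htu; apply h
  rw [PySem.Set.equal_iff] at hst htu ⊢
  intro x; exact (hst x).trans (htu x)

lemma pv_inter_congr_right (u s t : PySem.Set Int) (h : PySem.Set.equal s t = true) :
    PySem.Set.inter u s = PySem.Set.inter u t := by
  have hm := (PySem.Set.equal_iff s t).mp h
  show u.filter (fun x => PySem.Set.contains s x) = u.filter (fun x => PySem.Set.contains t x)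
  apply List.filter_congr
  intro x _
  by_cases hx : x ∈ s
  · have h1 : PySem.Set.contains s x = true := (PySem.Set.contains_iff s x).mpr hx
    have h2 : PySem.Set.contains t x = true := (PySem.Set.contains_iff t x).mpr ((hm x).mp hx)
    rw [h1, h2]
  · have h1 : PySem.Set.contains s x = false := by
      rw [Bool.eq_false_iff]; intro hc; exact hx ((PySem.Set.contains_iff s x).mp hc)
    have h2 : PySem.Set.contains t x = false := by
      rw [Bool.eq_false_iff]; intro hc; exact hx ((hm x).mpr ((PySem.Set.contains_iff t x).mp hc))
    rw [h1, h2]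

lemma pv_len_inter_congr_left {s t : PySem.Set Int} (u : PySem.Set Int)
    (hs : List.Nodup s) (ht : List.Nodup t) (h : PySem.Set.equal s t = true) :
    PySem.Set.len (PySem.Set.inter s u) = PySem.Set.len (PySem.Set.inter t u) := by
  have hm := (PySem.Set.equal_iff s t).mp h
  have hperm : (PySem.Set.inter s u).Perm (PySem.Set.inter t u) := by
    rw [List.perm_ext_iff_of_nodup (PySem.Set.nodup_inter s u hs) (PySem.Set.nodup_inter t u ht)]
    intro x
    rw [PySem.Set.mem_inter, PySem.Set.mem_inter]
    constructor
    · rintro ⟨h1, h2⟩; exact ⟨(hm x).mp h1, h2⟩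
    · rintro ⟨h1, h2⟩; exact ⟨(hm x).mpr h1, h2⟩
  show ((PySem.Set.inter s u).length : Int) = ((PySem.Set.inter t u).length : Int)
  rw [hperm.length_eq]

lemma pv_len_inter_comm {s t : PySem.Set Int} (hs : List.Nodup s) (ht : List.Nodup t) :
    PySem.Set.len (PySem.Set.inter s t) = PySem.Set.len (PySem.Set.inter t s) := by
  have hperm : (PySem.Set.inter s t).Perm (PySem.Set.inter t s) := by
    rw [List.perm_ext_iff_of_nodup (PySem.Set.nodup_inter s t hs) (PySem.Set.nodup_inter t s ht)]
    intro x
    rw [PySem.Set.mem_inter, PySem.Set.mem_inter]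
    exact ⟨fun ⟨a, b⟩ => ⟨b, a⟩, fun ⟨a, b⟩ => ⟨b, a⟩⟩
  show ((PySem.Set.inter s t).length : Int) = ((PySem.Set.inter t s).length : Int)
  rw [hperm.length_eq]

-- generic maximum fold (B's inner loop shape)
lemma pv_maxfold {α : Type} (l : List α) (f : α → Int) (a : Int) :
    a ≤ l.foldl (fun b t => if f t > b then f t else b) a ∧
    (l.foldl (fun b t => if f t > b then f t else b) a = a ∨
      ∃ t ∈ l, l.foldl (fun b t => if f t > b then f t else b) a = f t) ∧
    ∀ t ∈ l, f t ≤ l.foldl (fun b t => if f t > b then f t else b) a := by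
  induction l generalizing a with
  | nil => exact ⟨le_refl _, Or.inl rfl, by intro t ht; cases ht⟩
  | cons hd tl ih =>
    simp only [List.foldl_cons]
    by_cases hgt : f hd > a
    · simp only [if_pos hgt]
      obtain ⟨h1, h2, h3⟩ := ih (f hd)
      refine ⟨by omega, ?_, ?_⟩
      · rcases h2 with he | ⟨t, ht, he⟩
        · exact Or.inr ⟨hd, List.mem_cons_self, he⟩
        · exact Or.inr ⟨t, List.mem_cons_of_mem _ ht, he⟩
      · intro t ht
        rcases List.mem_cons.mp ht with rfl | ht
        · exact h1
        · exact h3 t ht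
    · simp only [if_neg hgt]
      obtain ⟨h1, h2, h3⟩ := ih a
      refine ⟨h1, ?_, ?_⟩
      · rcases h2 with he | ⟨t, ht, he⟩
        · exact Or.inl he
        · exact Or.inr ⟨t, List.mem_cons_of_mem _ ht, he⟩
      · intro t ht
        rcases List.mem_cons.mp ht with rfl | ht
        · omega
        · exact h3 t ht

-- A's inner loop
lemma pv_innerA (ys : List (List Int)) (x : List Int) (acc : Int) :
    acc ≤ ys.foldl (pvStepA x) acc ∧
    (ys.foldl (pvStepA x) acc = acc ∨
      ∃ y ∈ ys, PySem.Set.equal (PySem.Set.ofList x) (PySem.Set.ofList y) = false ∧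
        ys.foldl (pvStepA x) acc
          = PySem.Set.len (PySem.Set.inter (PySem.Set.ofList x) (PySem.Set.ofList y))) ∧
    ∀ y ∈ ys, PySem.Set.equal (PySem.Set.ofList x) (PySem.Set.ofList y) = false →
      PySem.Set.len (PySem.Set.inter (PySem.Set.ofList x) (PySem.Set.ofList y))
        ≤ ys.foldl (pvStepA x) acc := by
  induction ys generalizing acc with
  | nil => exact ⟨le_refl _, Or.inl rfl, by intro y hy; cases hy⟩
  | cons hd tl ih =>
    simp only [List.foldl_cons]
    by_cases heq : PySem.Set.equal (PySem.Set.ofList x) (PySem.Set.ofList hd) = true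
    · have hstep : pvStepA x acc hd = acc := by simp [pvStepA, heq]
      rw [hstep]
      obtain ⟨h1, h2, h3⟩ := ih acc
      refine ⟨h1, ?_, ?_⟩
      · rcases h2 with he | ⟨y, hy, hne, he⟩
        · exact Or.inl he
        · exact Or.inr ⟨y, List.mem_cons_of_mem _ hy, hne, he⟩
      · intro y hy hne
        rcases List.mem_cons.mp hy with rfl | hy
        · rw [hne] at heq; cases heq
        · exact h3 y hy hne
    · have hne : PySem.Set.equal (PySem.Set.ofList x) (PySem.Set.ofList hd) = false :=
        Bool.eq_false_iff.mpr heq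
      set c := PySem.Set.len (PySem.Set.inter (PySem.Set.ofList x) (PySem.Set.ofList hd)) with hc
      have hstep : pvStepA x acc hd = if c > acc then c else acc := by
        rw [hc]
        simp only [pvStepA, hne, Bool.false_eq_true, if_false]
      rw [hstep]
      by_cases hgt : c > acc
      · simp only [if_pos hgt]
        obtain ⟨h1, h2, h3⟩ := ih c
        refine ⟨by omega, ?_, ?_⟩
        · rcases h2 with he | ⟨y, hy, hne', he⟩
          · exact Or.inr ⟨hd, List.mem_cons_self, hne, he⟩
          · exact Or.inr ⟨y, List.mem_cons_of_mem _ hy, hne', he⟩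
        · intro y hy hne'
          rcases List.mem_cons.mp hy with rfl | hy
          · exact h1
          · exact h3 y hy hne'
      · simp only [if_neg hgt]
        obtain ⟨h1, h2, h3⟩ := ih acc
        refine ⟨h1, ?_, ?_⟩
        · rcases h2 with he | ⟨y, hy, hne', he⟩
          · exact Or.inl he
          · exact Or.inr ⟨y, List.mem_cons_of_mem _ hy, hne', he⟩
        · intro y hy hne'
          rcases List.mem_cons.mp hy with rfl | hy
          · omega
          · exact h3 y hy hne'

-- A's outer loop
lemma pv_outerA (xs full : List (List Int)) (acc : Int)
    (hsub : ∀ x ∈ xs, x ∈ full) (h0 : 0 ≤ acc) (hc : acc = 0 ∨ pvCand full acc) :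
    0 ≤ xs.foldl (fun a x => full.foldl (pvStepA x) a) acc ∧
    (xs.foldl (fun a x => full.foldl (pvStepA x) a) acc = 0 ∨
      pvCand full (xs.foldl (fun a x => full.foldl (pvStepA x) a) acc)) ∧
    acc ≤ xs.foldl (fun a x => full.foldl (pvStepA x) a) acc ∧
    ∀ x ∈ xs, ∀ y ∈ full,
      PySem.Set.equal (PySem.Set.ofList x) (PySem.Set.ofList y) = false →
      PySem.Set.len (PySem.Set.inter (PySem.Set.ofList x) (PySem.Set.ofList y))
        ≤ xs.foldl (fun a x => full.foldl (pvStepA x) a) acc := by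
  induction xs generalizing acc with
  | nil => exact ⟨h0, hc, le_refl _, by intro x hx; cases hx⟩
  | cons hd tl ih =>
    simp only [List.foldl_cons]
    obtain ⟨hi1, hi2, hi3⟩ := pv_innerA full hd acc
    have hacc' : 0 ≤ full.foldl (pvStepA hd) acc := le_trans h0 hi1
    have hc' : full.foldl (pvStepA hd) acc = 0 ∨ pvCand full (full.foldl (pvStepA hd) acc) := by
      rcases hi2 with he | ⟨y, hy, hne, he⟩
      · rw [he]; exact hc
      · exact Or.inr ⟨hd, hsub hd List.mem_cons_self, y, hy, hne, he⟩
    obtain ⟨h1, h2, h3, h4⟩ := ih (full.foldl (pvStepA hd) acc)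
      (fun x hx => hsub x (List.mem_cons_of_mem _ hx)) hacc' hc'
    refine ⟨h1, h2, le_trans hi1 h3, ?_⟩
    intro x hx y hy hne
    rcases List.mem_cons.mp hx with rfl | hx
    · exact le_trans (hi3 y hy hne) h3
    · exact h4 x hx y hy hne

lemma pv_A_good (modes : List (List Int)) : pvGood modes (get_max_intersection modes) := by
  unfold pvGood
  obtain ⟨h1, h2, _, h4⟩ :=
    pv_outerA modes modes 0 (fun x hx => hx) (le_refl 0) (Or.inl rfl)
  refine ⟨h1, h2, ?_⟩
  intro c hc
  obtain ⟨x, hx, y, hy, hne, rfl⟩ := hc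
  exact h4 x hx y hy hne

-- B's loop invariant
def pvInv (processed : List (List Int)) (st : List (PySem.Set Int) × Int) : Prop :=
  (∀ t ∈ st.1, ∃ m ∈ processed, t = PySem.Set.ofList m) ∧
  (∀ m ∈ processed, ∃ t ∈ st.1, PySem.Set.equal (PySem.Set.ofList m) t = true) ∧
  pvGood processed st.2

lemma pv_stepB_inv (processed : List (List Int)) (st : List (PySem.Set Int) × Int)
    (m : List Int) (h : pvInv processed st) :
    pvInv (processed ++ [m]) (pvStepB st m) := by
  unfold pvInv pvGood pvCand at h ⊢
  obtain ⟨hrep, hcov, hg0, hgc, hgub⟩ := h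
  have hsub : ∀ x ∈ processed, x ∈ processed ++ [m] := fun x hx => List.mem_append_left _ hx
  set s := PySem.Set.ofList m with hs
  by_cases hin : st.1.any (fun t => PySem.Set.equal t s) = true
  · -- s already represented: state unchanged
    have hstep : pvStepB st m = st := by simp [pvStepB, ← hs, hin]
    rw [hstep]
    obtain ⟨t0, ht0, heqt0⟩ := List.any_eq_true.mp hin
    obtain ⟨m0, hm0, rfl⟩ := hrep t0 ht0
    refine ⟨fun t ht => (hrep t ht).imp (fun m' ⟨hm', he⟩ => ⟨hsub m' hm', he⟩), ?_, hg0, ?_, ?_⟩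
    · intro m' hm'
      rcases List.mem_append.mp hm' with hm' | hm'
      · exact (hcov m' hm').imp (fun t ⟨ht, he⟩ => ⟨ht, he⟩)
      · have hmm : m' = m := List.mem_singleton.mp hm'
        rw [hmm]
        refine ⟨PySem.Set.ofList m0, ht0, ?_⟩
        rw [PySem.Set.equal_iff]
        intro x
        exact ((PySem.Set.equal_iff _ _).mp heqt0 x).symm
    · rcases hgc with he | hc
      · exact Or.inl he
      · exact Or.inr (pvCand_mono hsub hc)
    · -- every new candidate equals an old candidate
      intro c hc
      obtain ⟨x, hx, y, hy, hne, rfl⟩ := hc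
      have heqm : PySem.Set.equal s (PySem.Set.ofList m0) = true := by
        rw [PySem.Set.equal_iff]
        intro z
        exact ((PySem.Set.equal_iff _ _).mp heqt0 z).symm
      rcases List.mem_append.mp hx with hx | hx
      · rcases List.mem_append.mp hy with hy | hy
        · exact hgub _ ⟨x, hx, y, hy, hne, rfl⟩
        · -- y = m
          have hym : y = m := List.mem_singleton.mp hy
          rw [hym] at hne ⊢
          have hne' : PySem.Set.equal (PySem.Set.ofList x) (PySem.Set.ofList m0) = false := by
            apply pv_equal_false_comm
            exact pv_equal_false_congr_left heqm (pv_equal_false_comm hne)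
          have hlen : PySem.Set.len (PySem.Set.inter (PySem.Set.ofList x) s)
              = PySem.Set.len (PySem.Set.inter (PySem.Set.ofList x) (PySem.Set.ofList m0)) := by
            rw [pv_inter_congr_right _ _ _ heqm]
          rw [hlen]
          exact hgub _ ⟨x, hx, m0, hm0, hne', rfl⟩
      · -- x = m
        have hxm : x = m := List.mem_singleton.mp hx
        rw [hxm] at hne ⊢
        rcases List.mem_append.mp hy with hy | hy
        · have hne' : PySem.Set.equal (PySem.Set.ofList m0) (PySem.Set.ofList y) = false :=
            pv_equal_false_congr_left heqm hne
          have hlen : PySem.Set.len (PySem.Set.inter s (PySem.Set.ofList y))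
              = PySem.Set.len (PySem.Set.inter (PySem.Set.ofList m0) (PySem.Set.ofList y)) :=
            pv_len_inter_congr_left _ (PySem.Set.nodup_ofList m) (PySem.Set.nodup_ofList m0) heqm
          rw [hlen]
          exact hgub _ ⟨m0, hm0, y, hy, hne', rfl⟩
        · have hym : y = m := List.mem_singleton.mp hy
          rw [hym, pv_equal_refl] at hne; cases hne
  · -- s is new: pair it with every earlier representative
    have hnin : st.1.any (fun t => PySem.Set.equal t s) = false := Bool.eq_false_iff.mpr hin
    have hstep : pvStepB st m =
        (st.1 ++ [s],
         st.1.foldl (fun b t =>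
           let c := PySem.Set.len (PySem.Set.inter s t)
           if c > b then c else b) st.2) := by
      simp [pvStepB, ← hs, hnin]
    rw [hstep]
    have hnoeq : ∀ t ∈ st.1, PySem.Set.equal t s = false := by
      intro t ht
      rw [Bool.eq_false_iff]
      intro he
      exact (Bool.eq_false_iff.mp hnin) (List.any_eq_true.mpr ⟨t, ht, he⟩)
    obtain ⟨hf1, hf2, hf3⟩ :=
      pv_maxfold st.1 (fun t => PySem.Set.len (PySem.Set.inter s t)) st.2
    refine ⟨?_, ?_, le_trans hg0 hf1, ?_, ?_⟩
    · intro t ht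
      rcases List.mem_append.mp ht with ht | ht
      · exact (hrep t ht).imp (fun m' ⟨hm', he⟩ => ⟨hsub m' hm', he⟩)
      · have htm : t = s := List.mem_singleton.mp ht
        rw [htm]
        exact ⟨m, List.mem_append_right _ (List.mem_singleton_self m), rfl⟩
    · intro m' hm'
      rcases List.mem_append.mp hm' with hm' | hm'
      · exact (hcov m' hm').imp (fun t ⟨ht, he⟩ => ⟨List.mem_append_left _ ht, he⟩)
      · have hmm : m' = m := List.mem_singleton.mp hm'
        rw [hmm]
        exact ⟨s, List.mem_append_right _ (List.mem_singleton_self s), pv_equal_refl s⟩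
    · -- the new best is 0 or a candidate
      rcases hf2 with he | ⟨t, ht, he⟩
      · rw [he]
        rcases hgc with h0 | hc
        · exact Or.inl h0
        · exact Or.inr (pvCand_mono hsub hc)
      · right
        obtain ⟨m', hm', rfl⟩ := hrep t ht
        refine ⟨m, List.mem_append_right _ (List.mem_singleton_self m), m', hsub m' hm', ?_, he⟩
        exact pv_equal_false_comm (hnoeq _ ht)
    · -- upper bound on all candidates of processed ++ [m]
      intro c hc
      obtain ⟨x, hx, y, hy, hne, rfl⟩ := hc
      rcases List.mem_append.mp hx with hx | hx
      · rcases List.mem_append.mp hy with hy | hy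
        · exact le_trans (hgub _ ⟨x, hx, y, hy, hne, rfl⟩) hf1
        · -- (x, m) : rewrite to len (inter s t) for x's representative t
          have hym : y = m := List.mem_singleton.mp hy
          rw [hym] at hne ⊢
          obtain ⟨t, ht, heqx⟩ := hcov x hx
          obtain ⟨m', hm', rfl⟩ := hrep t ht
          have h1 : PySem.Set.len (PySem.Set.inter (PySem.Set.ofList x) s)
              = PySem.Set.len (PySem.Set.inter (PySem.Set.ofList m') s) :=
            pv_len_inter_congr_left _ (PySem.Set.nodup_ofList x) (PySem.Set.nodup_ofList m') heqx
          have h2 : PySem.Set.len (PySem.Set.inter (PySem.Set.ofList m') s)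
              = PySem.Set.len (PySem.Set.inter s (PySem.Set.ofList m')) :=
            pv_len_inter_comm (PySem.Set.nodup_ofList m') (PySem.Set.nodup_ofList m)
          rw [h1, h2]
          exact hf3 _ ht
      · have hxm : x = m := List.mem_singleton.mp hx
        rw [hxm] at hne ⊢
        rcases List.mem_append.mp hy with hy | hy
        · -- (m, y) : rewrite to len (inter s t) for y's representative t
          obtain ⟨t, ht, heqy⟩ := hcov y hy
          have h1 : PySem.Set.inter s (PySem.Set.ofList y) = PySem.Set.inter s t :=
            pv_inter_congr_right _ _ _ heqy
          rw [h1]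
          exact hf3 _ ht
        · have hym : y = m := List.mem_singleton.mp hy
          rw [hym, pv_equal_refl] at hne; cases hne

lemma pv_B_loop (ms processed : List (List Int)) (st : List (PySem.Set Int) × Int)
    (h : pvInv processed st) : pvInv (processed ++ ms) (ms.foldl pvStepB st) := by
  induction ms generalizing processed st with
  | nil => simpa using h
  | cons hd tl ih =>
    have h' := pv_stepB_inv processed st hd h
    have := ih (processed ++ [hd]) (pvStepB st hd) h'
    simpa using this

lemma pv_B_good (modes : List (List Int)) : pvGood modes (get_max_intersection_alt modes) := by
  have h0 : pvInv [] (([] : List (PySem.Set Int)), (0 : Int)) := by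
    unfold pvInv pvGood pvCand
    refine ⟨?_, ?_, ?_, ?_, ?_⟩
    · intro t ht; cases ht
    · intro m hm; cases hm
    · norm_num
    · left; norm_num
    · intro c hc
      obtain ⟨x, hx, -⟩ := hc
      cases hx
  have := pv_B_loop modes [] (([] : List (PySem.Set Int)), (0 : Int)) h0
  simp only [List.nil_append] at this
  unfold pvInv at this
  exact this.2.2

-- ===== VERDICT (by name: the statement is the Claim_ definition above) =====
theorem get_max_intersection_spec : Claim_equal_get_max_intersection := by
  intro modes _
  unfold Spec_get_max_intersection
  exact pvGood_unique (pv_A_good modes) (pv_B_good modes)
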